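-- pv_equiv track=rewrite | github.com/dvolk/specxplorer | app.py | find_common_roles
-- ===== SOURCE A (Python) =====
-- def find_common_roles(specs):
--     """Return roles that are common to all specs."""
--     ret = set()
--     for spec in specs:
--         roles = spec.get("parameters", {}).get("roles")
--         ret = ret.union(set(roles))
--     for spec in specs:
--         roles = spec.get("parameters", {}).get("roles")
--         ret = ret.intersection(set(roles))
--     return ret
-- ===== SOURCE B (Python) =====
-- def find_common_roles(specs):
--     """Return roles that are common to all specs."""
--     counts = {}
--     n = 0
--     for spec in specs:
--         n += 1
--         for role in set(spec.get("parameters", {}).get("roles")):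
--             counts[role] = counts.get(role, 0) + 1
--     return {role for role, c in counts.items() if c == n}
-- ===== Notes on version B (the rewrite author's own statement) =====
-- stated objective: alternative
-- what changed: B makes a single pass building a per-role occurrence counter (dict) and keeps the roles counted in every spec, instead of A's two passes maintaining a running union and then a running intersection of sets.
import Mathlib
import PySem

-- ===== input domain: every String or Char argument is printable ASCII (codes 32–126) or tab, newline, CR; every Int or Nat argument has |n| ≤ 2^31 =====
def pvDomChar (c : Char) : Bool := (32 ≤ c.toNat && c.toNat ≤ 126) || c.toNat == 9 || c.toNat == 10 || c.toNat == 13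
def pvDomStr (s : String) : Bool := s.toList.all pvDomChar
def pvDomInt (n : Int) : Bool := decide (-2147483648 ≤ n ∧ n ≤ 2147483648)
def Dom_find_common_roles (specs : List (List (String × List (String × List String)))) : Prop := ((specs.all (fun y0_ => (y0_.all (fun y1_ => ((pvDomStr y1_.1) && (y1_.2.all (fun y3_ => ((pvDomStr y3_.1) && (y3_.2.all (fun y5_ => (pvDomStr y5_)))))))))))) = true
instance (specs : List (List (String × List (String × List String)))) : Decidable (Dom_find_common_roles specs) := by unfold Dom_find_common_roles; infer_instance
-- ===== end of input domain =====

-- B replaces A's two passes (running union, then running intersection) with one pass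
-- counting, per role, in how many specs it occurs, keeping the roles counted in all specs.

-- spec.get("parameters", {}).get("roles") — total form: returns [] where Python yields
-- None (and set(None) raises TypeError); Pre_ excludes exactly those inputs.
def pvRoles (spec : List (String × List (String × List String))) : List String :=
  ((PySem.Dict.mk (((PySem.Dict.mk spec).get? "parameters").getD [])).get? "roles").getD []

-- ===== PORT A =====
def find_common_roles (specs : List (List (String × List (String × List String)))) : List String :=
  let ret : PySem.Set String := PySem.Set.empty
  let ret := specs.foldl (fun ret spec =>
    PySem.Set.union ret (PySem.Set.ofList (pvRoles spec))) ret
  let ret := specs.foldl (fun ret spec =>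
    PySem.Set.inter ret (PySem.Set.ofList (pvRoles spec))) ret
  ret

-- ===== PORT B =====
def find_common_roles_alt (specs : List (List (String × List (String × List String)))) : List String :=
  let counts : PySem.Dict String Int := PySem.Dict.empty
  let n : Int := specs.length
  let counts := specs.foldl (fun counts spec =>
    (PySem.Set.ofList (pvRoles spec)).foldl
      (fun counts role => counts.insert role (counts.getD role 0 + 1)) counts) counts
  PySem.Set.ofList ((counts.items.filter (fun p => p.2 == n)).map (·.1))

-- ===== PRECONDITION & SPEC =====
-- Pre_ excludes exactly the inputs where Python A raises TypeError: a spec whose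
-- "parameters" dict (defaulting to {}) has no "roles" key, so set(None) is taken.
def Pre_find_common_roles (specs : List (List (String × List (String × List String)))) : Prop :=
  ∀ spec ∈ specs,
    (((PySem.Dict.mk (((PySem.Dict.mk spec).get? "parameters").getD [])).get? "roles").isSome = true)
instance (specs : List (List (String × List (String × List String)))) : Decidable (Pre_find_common_roles specs) := by unfold Pre_find_common_roles; infer_instance

def pvWitness_find_common_roles : (List (List (String × List (String × List String)))) :=
  [[("parameters", [("roles", ["admin", "user"])])], [("parameters", [("roles", ["user"])])]]

def Spec_find_common_roles (specs : List (List (String × List (String × List String)))) (out : List String) : Prop := out = find_common_roles_alt specs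
instance (specs : List (List (String × List (String × List String)))) (out : List String) : Decidable (Spec_find_common_roles specs out) := by unfold Spec_find_common_roles; infer_instance

-- ===== CLAIM (what is proved, stated in full; the proofs are below) =====
def Claim_equal_find_common_roles : Prop := ∀ (specs : List (List (String × List (String × List String)))), Dom_find_common_roles specs → Pre_find_common_roles specs → Spec_find_common_roles specs (find_common_roles specs)

-- ===== LEMMAS AND PROOFS =====

-- A's second loop: successive intersections = one filter by membership in every spec's roles
lemma pv_foldl_inter (l : List (List (String × List (String × List String))))
    (ret : List String) :
    l.foldl (fun r s => PySem.Set.inter r (PySem.Set.ofList (pvRoles s))) ret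
      = ret.filter (fun x => l.all (fun s => PySem.Set.contains (PySem.Set.ofList (pvRoles s)) x)) := by
  induction l generalizing ret with
  | nil => simp
  | cons s l ih =>
      simp only [List.foldl_cons, ih, List.all_cons]
      rw [show PySem.Set.inter ret (PySem.Set.ofList (pvRoles s))
            = ret.filter (fun x => PySem.Set.contains (PySem.Set.ofList (pvRoles s)) x) from rfl,
          List.filter_filter]
      exact List.filter_congr (fun x _ => Bool.and_comm _ _)

-- A's first loop (unions) produces exactly B's counter's key list
lemma pv_keys_counts (l : List (List (String × List (String × List String))))
    (d : PySem.Dict String Int) :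
    (l.foldl (fun counts spec =>
        (PySem.Set.ofList (pvRoles spec)).foldl
          (fun counts role => counts.insert role (counts.getD role 0 + 1)) counts) d).keys
      = l.foldl (fun acc s => PySem.Set.update acc (PySem.Set.ofList (pvRoles s))) d.keys := by
  induction l generalizing d with
  | nil => rfl
  | cons s l ih =>
      simp only [List.foldl_cons, ih, PySem.Dict.keys_foldl_insert]

lemma pv_nodup_keys_counts (l : List (List (String × List (String × List String))))
    (d : PySem.Dict String Int) (h : d.keys.Nodup) :
    (l.foldl (fun counts spec =>
        (PySem.Set.ofList (pvRoles spec)).foldl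
          (fun counts role => counts.insert role (counts.getD role 0 + 1)) counts) d).keys.Nodup := by
  induction l generalizing d with
  | nil => exact h
  | cons s l ih =>
      exact ih _ (PySem.Dict.nodup_keys_foldl_insert _ _ _ h)

-- the counter counts, per role, the number of specs whose role-set contains it
lemma pv_getD_counts (l : List (List (String × List (String × List String))))
    (d : PySem.Dict String Int) (v : String) :
    (l.foldl (fun counts spec =>
        (PySem.Set.ofList (pvRoles spec)).foldl
          (fun counts role => counts.insert role (counts.getD role 0 + 1)) counts) d).getD v 0
      = d.getD v 0 + (l.countP (fun s => PySem.Set.contains (PySem.Set.ofList (pvRoles s)) v) : Int) := by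
  induction l generalizing d with
  | nil => simp
  | cons s l ih =>
      simp only [List.foldl_cons, ih, PySem.Dict.getD_foldl_insert_add_one, List.countP_cons]
      by_cases hv : v ∈ PySem.Set.ofList (pvRoles s)
      · rw [List.count_eq_one_of_mem (PySem.Set.nodup_ofList _) hv,
            if_pos (by simpa [PySem.Set.contains_iff] using hv)]
        push_cast; ring
      · rw [List.count_eq_zero_of_not_mem hv,
            if_neg (by simpa [PySem.Set.contains_iff] using hv)]
        push_cast; ring

-- count = number of specs  ↔  the role is in every spec
lemma pv_pred_eq (specs : List (List (String × List (String × List String)))) (v : String) :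
    ((specs.countP (fun s => PySem.Set.contains (PySem.Set.ofList (pvRoles s)) v) : Int)
        == (specs.length : Int))
      = specs.all (fun s => PySem.Set.contains (PySem.Set.ofList (pvRoles s)) v) := by
  rcases Bool.eq_false_or_eq_true
      (specs.all (fun s => PySem.Set.contains (PySem.Set.ofList (pvRoles s)) v)) with h | h
  · rw [h]
    rw [List.countP_eq_length.mpr (List.all_eq_true.mp h)]
    exact beq_self_eq_true _
  · rw [h]
    have hne : specs.countP (fun s => PySem.Set.contains (PySem.Set.ofList (pvRoles s)) v)
        ≠ specs.length := by
      intro hc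
      rw [List.all_eq_false] at h
      obtain ⟨s, hs, hfs⟩ := h
      exact hfs (List.countP_eq_length.mp hc s hs)
    have hle := List.countP_le_length
      (p := fun s => PySem.Set.contains (PySem.Set.ofList (pvRoles s)) v) (l := specs)
    rw [beq_eq_false_iff_ne]
    intro hc
    exact hne (by exact_mod_cast hc)

-- ===== VERDICT (by name: the statement is the Claim_ definition above) =====
theorem find_common_roles_spec : Claim_equal_find_common_roles := by
  intro specs _ _
  show find_common_roles specs = find_common_roles_alt specs
  simp only [find_common_roles, find_common_roles_alt]
  have hnodup := pv_nodup_keys_counts specs PySem.Dict.empty (by simp)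
  rw [pv_foldl_inter,
      PySem.Dict.items_eq_map_keys _ hnodup 0,
      List.filter_map, List.map_map]
  have hmap : ((fun p : String × Int => p.2 == (specs.length : Int)) ∘
      fun k => (k, (specs.foldl (fun counts spec =>
        (PySem.Set.ofList (pvRoles spec)).foldl
          (fun counts role => counts.insert role (counts.getD role 0 + 1)) counts)
        PySem.Dict.empty).getD k 0))
      = fun k => specs.all (fun s => PySem.Set.contains (PySem.Set.ofList (pvRoles s)) k) := by
    funext k
    simp only [Function.comp]
    rw [pv_getD_counts]
    simpa using pv_pred_eq specs k
  rw [hmap]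
  have hkeys := pv_keys_counts specs PySem.Dict.empty
  simp only [PySem.Dict.keys_empty] at hkeys
  rw [hkeys]
  have hsame : (List.foldl (fun ret spec =>
      PySem.Set.union ret (PySem.Set.ofList (pvRoles spec))) PySem.Set.empty specs : List String)
      = List.foldl (fun acc s => PySem.Set.update acc (PySem.Set.ofList (pvRoles s))) [] specs := rfl
  rw [← hsame]
  have hnodupU : (List.foldl (fun ret spec =>
      PySem.Set.union ret (PySem.Set.ofList (pvRoles spec))) PySem.Set.empty specs : List String).Nodup := by
    rw [hsame, ← hkeys]; exact hnodup
  simp only [Function.comp_def, List.map_id']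
  exact (PySem.Set.ofList_eq_self_of_nodup _ (hnodupU.filter _)).symm
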